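-- pv_equiv track=rewrite | github.com/isabella232/Events-in-videos | code/_3.detect_writing_style_disagreement_strings.py | merge_space_separated
-- ===== SOURCE A (Python) =====
-- def merge_space_separated(words,all_words):
--     merge_space_separated_words = []
--     previous_matched = False
--     if len(words) == 1:
--         merge_space_separated_words = words
--     for i in range(1, len(words)):
--         previous_word = words[i-1]
--         word = words[i]
--         merged = previous_word+word
--         if previous_matched:
--             if i == len(words)-1:
--                 merge_space_separated_words.append(word)
--                 previous_matched = True
--             else:
--                 previous_matched = False
--         else:
--             if merged in all_words:
--                 merge_space_separated_words.append(merged)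
--                 previous_matched = True
--             elif i == len(words)-1:
--                 merge_space_separated_words.append(previous_word)
--                 merge_space_separated_words.append(word)
--             else:
--                 merge_space_separated_words.append(previous_word)
--                 previous_matched = False
--     return merge_space_separated_words
-- ===== SOURCE B (Python) =====
-- def merge_space_separated(words, all_words):
--     n = len(words)
--     # dynamic program, filled back-to-front over shared cons cells:
--     # suffix[i] = linked list (head, tail) holding the merged form of words[i:]
--     suffix = [None] * (n + 2)
--     suffix[n] = ()
--     suffix[n + 1] = ()
--     for i in range(n - 1, -1, -1):
--         if i + 1 < n and words[i] + words[i + 1] in all_words: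
--             suffix[i] = (words[i] + words[i + 1], suffix[i + 2])
--         else:
--             suffix[i] = (words[i], suffix[i + 1])
--     out = []
--     cell = suffix[0]
--     while cell:
--         out.append(cell[0])
--         cell = cell[1]
--     return out
-- ===== Notes on version B (the rewrite author's own statement) =====
-- stated objective: alternative
-- what changed: Replaces A's left-to-right for-loop state machine (a previous_matched flag with look-back pairing and a len==1 special case) by a right-to-left dynamic program that fills a table of shared cons-cell suffix results (suffix[i] = merged form of words[i:]) and materializes the entry for index 0.
import Mathlib
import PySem

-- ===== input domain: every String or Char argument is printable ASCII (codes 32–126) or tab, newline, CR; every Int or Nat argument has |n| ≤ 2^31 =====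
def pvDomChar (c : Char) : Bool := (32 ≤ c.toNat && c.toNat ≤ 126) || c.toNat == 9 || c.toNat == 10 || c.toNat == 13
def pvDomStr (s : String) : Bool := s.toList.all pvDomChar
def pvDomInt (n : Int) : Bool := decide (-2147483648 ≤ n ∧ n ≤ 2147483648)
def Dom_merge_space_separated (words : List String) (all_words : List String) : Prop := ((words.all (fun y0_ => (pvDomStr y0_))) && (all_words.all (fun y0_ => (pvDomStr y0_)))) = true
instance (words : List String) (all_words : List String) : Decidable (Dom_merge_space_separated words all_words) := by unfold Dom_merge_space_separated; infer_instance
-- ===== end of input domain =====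

-- B replaces A's left-to-right previous_matched state machine by a right-to-left dynamic
-- program over a suffix-result table (objective: alternative); return values agree on all inputs.

-- ===== PORT A =====
-- step of A's for-loop over i in range(1, len(words)); state = (merge_space_separated_words, previous_matched)
def mssA_step (words : List String) (all_words : List String) (n : Int)
    (st : List String × Bool) (i : Int) : List String × Bool :=
  let previous_word := PySem.List.pyGetD words (i - 1) ""   -- in range for i ∈ range(1, n): exact
  let word := PySem.List.pyGetD words i ""
  let merged := previous_word ++ word
  if st.2 then
    if i = n - 1 then (st.1 ++ [word], true) else (st.1, false)
  else
    if merged ∈ all_words then (st.1 ++ [merged], true)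
    else if i = n - 1 then (st.1 ++ [previous_word, word], st.2)
    else (st.1 ++ [previous_word], false)

def merge_space_separated (words : List String) (all_words : List String) : List String :=
  ((PySem.List.pyRange 1 (words.length : Int) 1).foldl
      (mssA_step words all_words (words.length : Int))
      (if words.length = 1 then words else [], false)).1

-- ===== PORT B =====
-- body of B's for-loop over i in range(n-1, -1, -1); a cons cell (h, t) is h :: t, the empty
-- cell () is []; the table assignment suffix[i] = v is pySetD (0 ≤ i < n+2 in the loop, so exact)
def mssB_step (words : List String) (all_words : List String) (n : Int)
    (suffix : List (List String)) (i : Int) : List (List String) :=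
  if i + 1 < n ∧ (PySem.List.pyGetD words i "" ++ PySem.List.pyGetD words (i + 1) "") ∈ all_words then
    PySem.List.pySetD suffix i
      ((PySem.List.pyGetD words i "" ++ PySem.List.pyGetD words (i + 1) "")
        :: PySem.List.pyGetD suffix (i + 2) [])
  else
    PySem.List.pySetD suffix i
      (PySem.List.pyGetD words i "" :: PySem.List.pyGetD suffix (i + 1) [])

-- B's final while loop: walk the cons cells, appending each head to out
def mssB_copy (out : List String) (cell : List String) : List String :=
  match cell with
  | [] => out
  | x :: rest => mssB_copy (out ++ [x]) rest

def merge_space_separated_alt (words : List String) (all_words : List String) : List String :=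
  let n : Int := words.length
  -- [None]*(n+2): the None placeholders are never read; modelled as [] placeholders
  let suffix0 : List (List String) := List.replicate (n + 2).toNat []
  let suffix1 := PySem.List.pySetD (PySem.List.pySetD suffix0 n []) (n + 1) []
  let final := (PySem.List.pyRange (n - 1) (-1) (-1)).foldl (mssB_step words all_words n) suffix1
  mssB_copy [] (PySem.List.pyGetD final 0 [])

-- ===== PRECONDITION & SPEC =====
def Spec_merge_space_separated (words : List String) (all_words : List String) (out : List String) : Prop := out = merge_space_separated_alt words all_words
instance (words : List String) (all_words : List String) (out : List String) : Decidable (Spec_merge_space_separated words all_words out) := by unfold Spec_merge_space_separated; infer_instance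

-- ===== CLAIM (what is proved, stated in full; the proofs are below) =====
def Claim_equal_merge_space_separated : Prop := ∀ (words : List String) (all_words : List String), Dom_merge_space_separated words all_words → Spec_merge_space_separated words all_words (merge_space_separated words all_words)

-- ===== LEMMAS AND PROOFS =====

-- reference greedy suffix function: gf i = merged result of words[i:]
def gf (words : List String) (all_words : List String) (n : Int) (i : Int) : List String :=
  if _h : i < n then
    if i + 1 < n ∧ (PySem.List.pyGetD words i "" ++ PySem.List.pyGetD words (i + 1) "") ∈ all_words then
      (PySem.List.pyGetD words i "" ++ PySem.List.pyGetD words (i + 1) "") :: gf words all_words n (i + 2)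
    else
      PySem.List.pyGetD words i "" :: gf words all_words n (i + 1)
  else []
termination_by (n - i).toNat
decreasing_by all_goals omega

lemma gf_of_ge (words all_words : List String) (n i : Int) (h : n ≤ i) :
    gf words all_words n i = [] := by
  rw [gf]; rw [dif_neg (by omega)]

-- A-side: A's fold from index i equals the accumulator followed by gf (two regimes of the flag)
lemma mssA_key (words all_words : List String) (n : Int) :
    ∀ (k : Nat) (i : Int) (acc : List String), (n - i).toNat ≤ k →
      ((1 ≤ i → i ≤ n - 1 →
        ((PySem.List.pyRange i n 1).foldl (mssA_step words all_words n) (acc, true)).1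
          = acc ++ gf words all_words n i)
      ∧ (0 ≤ i → i ≤ n - 2 →
        ((PySem.List.pyRange (i + 1) n 1).foldl (mssA_step words all_words n) (acc, false)).1
          = acc ++ gf words all_words n i)) := by
  intro k
  induction k with
  | zero =>
      intro i acc hk
      constructor
      · intro h1 h2; omega
      · intro h0 h2; omega
  | succ k ih =>
      intro i acc hk
      have hF : 0 ≤ i → i ≤ n - 2 →
          ((PySem.List.pyRange (i + 1) n 1).foldl (mssA_step words all_words n) (acc, false)).1
            = acc ++ gf words all_words n i := by
        intro h0 h2
        rw [PySem.List.pyRange_one_cons (by omega : i + 1 < n)]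
        rw [gf, dif_pos (by omega : i < n)]
        simp only [List.foldl_cons, mssA_step, add_sub_cancel_right, Bool.false_eq_true,
          if_false]
        by_cases hm : (PySem.List.pyGetD words i "" ++ PySem.List.pyGetD words (i + 1) "") ∈ all_words
        · rw [if_pos hm, if_pos ⟨by omega, hm⟩]
          by_cases hend : 1 ≤ i + 2 ∧ i + 2 ≤ n - 1
          · rw [show (i : Int) + 2 = i + 1 + 1 by ring] at hend ⊢
            rw [(ih (i + 1 + 1)
              (acc ++ [PySem.List.pyGetD words i "" ++ PySem.List.pyGetD words (i + 1) ""])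
              (by omega)).1 hend.1 hend.2]
            simp
          · rw [PySem.List.pyRange_one_eq_nil (by omega)]
            simp [gf_of_ge words all_words n (i + 2) (by omega)]
        · rw [if_neg hm, if_neg (show ¬(i + 1 < n ∧ PySem.List.pyGetD words i "" ++ PySem.List.pyGetD words (i + 1) "" ∈ all_words) from fun hc => hm hc.2)]
          by_cases hend : i + 1 = n - 1
          · rw [if_pos hend, PySem.List.pyRange_one_eq_nil (by omega)]
            simp only [List.foldl_nil]
            rw [gf, dif_pos (by omega : i + 1 < n),
              if_neg (show ¬(i + 1 + 1 < n ∧ PySem.List.pyGetD words (i+1) "" ++ PySem.List.pyGetD words (i + 1 + 1) "" ∈ all_words) from fun hc => absurd hc.1 (by omega)),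
              gf_of_ge words all_words n (i + 1 + 1) (by omega)]
          · rw [if_neg hend]
            rw [(ih (i + 1) (acc ++ [PySem.List.pyGetD words i ""]) (by omega)).2
              (by omega) (by omega)]
            simp
      refine ⟨?_, hF⟩
      intro h1 h2
      rw [PySem.List.pyRange_one_cons (by omega : i < n)]
      simp only [List.foldl_cons, mssA_step]
      by_cases hl : i = n - 1
      · simp only [if_true]
        rw [if_pos hl, PySem.List.pyRange_one_eq_nil (by omega)]
        simp only [List.foldl_nil]
        rw [gf, dif_pos (by omega : i < n), if_neg (show ¬(i + 1 < n ∧ PySem.List.pyGetD words i "" ++ PySem.List.pyGetD words (i + 1) "" ∈ all_words) from fun hc => absurd hc.1 (by omega)),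
          gf_of_ge words all_words n (i + 1) (by omega)]
      · simp only [if_true]
        rw [if_neg hl]
        exact hF (by omega) (by omega)

-- B-side: pyGetD after pySetD, Int indices
lemma getD_setD {α : Type} (xs : List α) (i j : Int) (v d : α)
    (h0 : 0 ≤ i) (hl : i < (xs.length : Int)) (hj : 0 ≤ j) :
    PySem.List.pyGetD (PySem.List.pySetD xs i v) j d
      = if j = i then v else PySem.List.pyGetD xs j d := by
  obtain ⟨a, rfl⟩ := Int.eq_ofNat_of_zero_le h0
  obtain ⟨b, rfl⟩ := Int.eq_ofNat_of_zero_le hj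
  have := PySem.List.pyGetD_pySetD_natCast xs a b v d (by exact_mod_cast hl)
  simpa using this

-- B-side invariant: folding the countdown range from i down to 0 fills every entry j ≥ 0 with gf j,
-- provided all entries above i already hold gf
lemma mssB_key (words all_words : List String) (n : Int) :
    ∀ (k : Nat) (i : Int) (suffix : List (List String)), (i + 1).toNat ≤ k → i < n →
      (suffix.length : Int) = n + 2 →
      (∀ j : Int, i < j → PySem.List.pyGetD suffix j [] = gf words all_words n j) →
      (∀ j : Int, 0 ≤ j →
        PySem.List.pyGetD ((PySem.List.pyRange i (-1) (-1)).foldl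
            (mssB_step words all_words n) suffix) j []
          = gf words all_words n j) := by
  intro k
  induction k with
  | zero =>
      intro i suffix hk hn hlen hinv j hj
      rw [PySem.List.pyRange_neg_one_eq_nil (by omega : i ≤ -1)]
      simp only [List.foldl_nil]
      exact hinv j (by omega)
  | succ k ih =>
      intro i suffix hk hn hlen hinv j hj
      by_cases hi : 0 ≤ i
      · rw [PySem.List.pyRange_neg_one_cons (by omega : (-1 : Int) < i)]
        simp only [List.foldl_cons]
        have hwrite : mssB_step words all_words n suffix i
            = PySem.List.pySetD suffix i (gf words all_words n i) := by
          rw [mssB_step, gf, dif_pos hn]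
          by_cases hc : i + 1 < n ∧
              (PySem.List.pyGetD words i "" ++ PySem.List.pyGetD words (i + 1) "") ∈ all_words
          · rw [if_pos hc, if_pos hc, hinv (i + 2) (by omega)]
          · rw [if_neg hc, if_neg hc, hinv (i + 1) (by omega)]
        rw [hwrite]
        refine ih (i - 1) _ (by omega) (by omega) (by rw [PySem.List.length_pySetD]; exact hlen) ?_ j hj
        intro m hm
        rw [getD_setD suffix i m _ [] hi (by omega) (by omega)]
        by_cases hmi : m = i
        · rw [if_pos hmi, hmi]
        · rw [if_neg hmi]
          exact hinv m (by omega)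
      · rw [PySem.List.pyRange_neg_one_eq_nil (by omega : i ≤ -1)]
        simp only [List.foldl_nil]
        exact hinv j (by omega)

-- every entry of the initial replicate table reads []
lemma pyGetD_replicate (k : Nat) (j : Int) :
    PySem.List.pyGetD (List.replicate k ([] : List String)) j [] = [] := by
  simp only [PySem.List.pyGetD, PySem.List.pyGet?, PySem.List.pyIdx?]
  split <;> split <;> simp

-- the while loop only copies its cell onto out
lemma mssB_copy_eq (cell : List String) : ∀ out : List String, mssB_copy out cell = out ++ cell := by
  induction cell with
  | nil => intro out; rw [mssB_copy]; simp
  | cons x rest ih => intro out; rw [mssB_copy, ih]; simp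

-- B equals gf at 0
lemma mssB_main (words all_words : List String) :
    merge_space_separated_alt words all_words
      = gf words all_words (words.length : Int) 0 := by
  rw [merge_space_separated_alt]
  rw [mssB_copy_eq, List.nil_append]
  refine mssB_key words all_words (words.length : Int)
    ((words.length : Int) - 1 + 1).toNat ((words.length : Int) - 1) _ le_rfl (by omega)
    (by simp only [PySem.List.length_pySetD, List.length_replicate]; omega) ?_ 0 le_rfl
  intro j hj
  have hlen : ((List.replicate (((words.length : Int) + 2)).toNat ([] : List String)).length : Int)
      = (words.length : Int) + 2 := by
    simp only [List.length_replicate]; omega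
  rw [gf_of_ge words all_words _ j (by omega)]
  rw [getD_setD _ _ _ _ _ (by omega) (by simp only [PySem.List.length_pySetD]; omega) (by omega)]
  split
  · rfl
  · rw [getD_setD _ _ _ _ _ (by omega) (by omega) (by omega), pyGetD_replicate]
    split <;> rfl

-- A equals gf at 0
lemma mssA_main (words all_words : List String) :
    merge_space_separated words all_words
      = gf words all_words (words.length : Int) 0 := by
  match words with
  | [] =>
      rw [merge_space_separated, gf]
      simp [PySem.List.pyRange_one_eq_nil]
  | [w] =>
      rw [merge_space_separated, gf]
      rw [dif_pos (by simp : (0:Int) < (([w] : List String).length : Int))]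
      rw [if_neg (show ¬((0:Int) + 1 < (([w] : List String).length : Int) ∧
        PySem.List.pyGetD [w] 0 "" ++ PySem.List.pyGetD [w] (0 + 1) "" ∈ all_words) from
        fun hc => by simp at hc)]
      rw [gf_of_ge _ _ _ _ (by simp : (([w] : List String).length : Int) ≤ 0 + 1)]
      rw [PySem.List.pyRange_one_eq_nil (by simp)]
      simp [PySem.List.pyGetD_zero_cons]
  | w1 :: w2 :: ws =>
      have h := ((mssA_key (w1 :: w2 :: ws) all_words ((w1 :: w2 :: ws).length : Int)
        ((w1 :: w2 :: ws).length.succ) 0 [] (by omega)).2 (by omega) (by simp; omega))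
      rw [merge_space_separated]
      rw [if_neg (by simp)]
      simpa using h

-- ===== VERDICT (by name: the statement is the Claim_ definition above) =====
theorem merge_space_separated_spec : Claim_equal_merge_space_separated := by
  intro words all_words _
  unfold Spec_merge_space_separated
  rw [mssA_main, mssB_main]
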